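-- pv_equiv track=rewrite | github.com/leric32/slot_game-SUMA_hackathon | RTP_calc/rtp_freq.py | generateMatrices
-- ===== SOURCE A (Python) =====
-- tracks = [
--     [0, 0, 3, 4, 5, 2, 4, 1, 5, 5, 3, 1, 2, 5, 8, 3, 4, 5, 2, 2, 9, 4, 5, 3, 4],
--     [0, 0, 5, 4, 2, 3, 5, 1, 1, 4, 3, 5, 2, 3, 4, 3, 5, 2, 8, 1, 4, 5, 3, 4, 3],
--     [0, 0, 4, 3, 4, 5, 5, 3, 1, 5, 2, 5, 1, 5, 8, 4, 5, 10, 4, 2, 5, 4, 5, 4, 4],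
--     [0, 0, 4, 4, 5, 4, 5, 2, 1, 5, 2, 5, 3, 3, 4, 8, 5, 4, 2, 3, 5, 4, 5, 2, 3]
-- ];
--
-- def generateMatrices(tracks):
--     matrices = [];
--     for line0 in range(len(tracks[0])):
--         for line1 in range(len(tracks[1])):
--             for line2 in range(len(tracks[2])):
--                 for line3 in range(len(tracks[3])):
--                     matrix = [];
--                     if(line0 > len(tracks[0]) - 4):
--                         matrix.append(tracks[0][line0:] + tracks[0][: 4 - len(tracks[0]) + line0]);
--                     else:
--                         matrix.append(tracks[0][line0 : line0 + 4]);
--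
--                     if (line1 > len(tracks[1]) - 4):
--                         matrix.append(tracks[1][line1:] + tracks[1][: 4 - len(tracks[1]) + line1]);
--                     else:
--                         matrix.append(tracks[1][line1: line1 + 4]);
--
--                     if (line2 > len(tracks[2]) - 4):
--                         matrix.append(tracks[2][line2:] + tracks[2][: 4 - len(tracks[2]) + line2]);
--                     else:
--                         matrix.append(tracks[2][line2: line2 + 4]);
--
--                     if (line3 > len(tracks[3]) - 4):
--                         matrix.append(tracks[3][line3:] + tracks[3][: 4 - len(tracks[3]) + line3]);
--                     else:
--                         matrix.append(tracks[3][line3: line3 + 4]);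
--
--                     matrices.append(matrix);
--     return matrices;
--
-- matrices = generateMatrices(tracks);
-- ===== SOURCE B (Python) =====
-- def generateMatrices(tracks):
--     # window table per track: rotate-then-truncate replaces the conditional wrap slices
--     ws = [[(t[i:] + t)[:4] for i in range(len(t))] for t in tracks[:4]]
--     total = 1
--     for w in ws:
--         total *= len(w)
--     matrices = []
--     for idx in range(total):
--         rem = idx
--         matrix = []
--         for w in reversed(ws):
--             rem, r = divmod(rem, len(w))
--             matrix.append(w[r])
--         matrix.reverse()
--         matrices.append(matrix)
--     return matrices
-- ===== Notes on version B (the rewrite author's own statement) =====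
-- stated objective: alternative
-- what changed: B replaces the four nested loops with conditional wrap slices by a single flat loop over range(n0*n1*n2*n3) that decodes each index into four window positions with divmod, and computes each window by the rotate-then-truncate trick (t[i:]+t)[:4] instead of the two-branch slice arithmetic.
-- outside the precondition, e.g. on generateMatrices([[1], [2]]): A raises IndexError, B returns [[[1, 1], [2, 2]]]
import Mathlib
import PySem

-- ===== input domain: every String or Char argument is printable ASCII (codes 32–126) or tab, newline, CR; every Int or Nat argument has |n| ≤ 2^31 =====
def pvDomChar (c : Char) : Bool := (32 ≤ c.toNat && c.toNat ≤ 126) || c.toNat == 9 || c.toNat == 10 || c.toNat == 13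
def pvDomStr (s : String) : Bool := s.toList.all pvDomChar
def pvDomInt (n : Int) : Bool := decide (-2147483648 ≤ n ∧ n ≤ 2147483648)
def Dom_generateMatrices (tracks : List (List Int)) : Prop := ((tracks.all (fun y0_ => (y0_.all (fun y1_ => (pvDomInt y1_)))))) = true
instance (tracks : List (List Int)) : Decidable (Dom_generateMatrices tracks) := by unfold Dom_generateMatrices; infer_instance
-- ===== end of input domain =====

-- B replaces the four nested loops by one flat loop over range(n0*n1*n2*n3) that decodes each
-- index with divmod, and computes each window as (t[i:]+t)[:4] instead of two-branch wrap
-- slices (objective: alternative; same asymptotic cost).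

-- ===== PORT A =====
-- literal transliteration: four nested loops, recomputing each conditional slice expression inside the innermost body
def generateMatrices (tracks : List (List Int)) : List (List (List Int)) :=
  let t0 := PySem.List.pyGetD tracks 0 []
  let t1 := PySem.List.pyGetD tracks 1 []
  let t2 := PySem.List.pyGetD tracks 2 []
  let t3 := PySem.List.pyGetD tracks 3 []
  (PySem.List.pyRange 0 (t0.length : Int) 1).foldl (fun acc0 line0 =>
    (PySem.List.pyRange 0 (t1.length : Int) 1).foldl (fun acc1 line1 =>
      (PySem.List.pyRange 0 (t2.length : Int) 1).foldl (fun acc2 line2 =>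
        (PySem.List.pyRange 0 (t3.length : Int) 1).foldl (fun acc3 line3 =>
          acc3 ++ [[
            (if line0 > (t0.length : Int) - 4 then
              PySem.List.slice t0 (some line0) none ++ PySem.List.slice t0 none (some (4 - (t0.length : Int) + line0))
            else PySem.List.slice t0 (some line0) (some (line0 + 4))),
            (if line1 > (t1.length : Int) - 4 then
              PySem.List.slice t1 (some line1) none ++ PySem.List.slice t1 none (some (4 - (t1.length : Int) + line1))
            else PySem.List.slice t1 (some line1) (some (line1 + 4))),
            (if line2 > (t2.length : Int) - 4 then
              PySem.List.slice t2 (some line2) none ++ PySem.List.slice t2 none (some (4 - (t2.length : Int) + line2))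
            else PySem.List.slice t2 (some line2) (some (line2 + 4))),
            (if line3 > (t3.length : Int) - 4 then
              PySem.List.slice t3 (some line3) none ++ PySem.List.slice t3 none (some (4 - (t3.length : Int) + line3))
            else PySem.List.slice t3 (some line3) (some (line3 + 4)))]]) acc2) acc1) acc0) []

-- ===== PORT B =====
-- (t[i:] + t)[:4]  — the rotate-then-truncate window of Source B
def pvRotW (t : List Int) (i : Int) : List Int :=
  PySem.List.slice (PySem.List.slice t (some i) none ++ t) none (some 4)

def generateMatrices_alt (tracks : List (List Int)) : List (List (List Int)) :=
  let ws := (PySem.List.slice tracks none (some 4)).map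
    (fun t => (PySem.List.pyRange 0 (t.length : Int) 1).map (pvRotW t))
  let total := ws.foldl (fun acc w => acc * (w.length : Int)) 1
  (PySem.List.pyRange 0 total 1).foldl (fun matrices idx =>
    let p := ws.reverse.foldl
      (fun (p : Int × List (List Int)) w =>
        (PySem.Int.floordiv p.1 (w.length : Int),
         p.2 ++ [PySem.List.pyGetD w (PySem.Int.mod p.1 (w.length : Int)) []]))
      (idx, ([] : List (List Int)))
    matrices ++ [p.2.reverse]) []

-- ===== PRECONDITION & SPEC =====
-- Pre_ excludes exactly the inputs where the Python A raises IndexError: fewer than four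
-- tracks, all of them nonempty (then the loops reach an out-of-range tracks[k])
def Pre_generateMatrices (tracks : List (List Int)) : Prop :=
  4 ≤ tracks.length ∨ tracks.any List.isEmpty = true
instance (tracks : List (List Int)) : Decidable (Pre_generateMatrices tracks) := by unfold Pre_generateMatrices; infer_instance
def pvWitness_generateMatrices : List (List Int) := [[1, 2, 3, 4, 5], [1], [2, 2], [0, 1, 2, 3]]

def Spec_generateMatrices (tracks : List (List Int)) (out : List (List (List Int))) : Prop := out = generateMatrices_alt tracks
instance (tracks : List (List Int)) (out : List (List (List Int))) : Decidable (Spec_generateMatrices tracks out) := by unfold Spec_generateMatrices; infer_instance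

-- ===== CLAIM (what is proved, stated in full; the proofs are below) =====
def Claim_equal_generateMatrices : Prop := ∀ (tracks : List (List Int)), Dom_generateMatrices tracks → Pre_generateMatrices tracks → Spec_generateMatrices tracks (generateMatrices tracks)

-- ===== LEMMAS AND PROOFS =====

-- common normal form of both ports (proof-only helper)
def pvNF (t0 t1 t2 t3 : List Int) : List (List (List Int)) :=
  (PySem.List.pyRange 0 (t0.length : Int) 1).flatMap (fun i0 =>
    (PySem.List.pyRange 0 (t1.length : Int) 1).flatMap (fun i1 =>
      (PySem.List.pyRange 0 (t2.length : Int) 1).flatMap (fun i2 =>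
        (PySem.List.pyRange 0 (t3.length : Int) 1).flatMap (fun i3 =>
          [[pvRotW t0 i0, pvRotW t1 i1, pvRotW t2 i2, pvRotW t3 i3]]))))

-- pvRotW is "rotate, then take 4"
theorem rotW_take (t : List Int) (k : Nat) :
    pvRotW t (k : Int) = (t.drop k ++ t).take 4 := by
  unfold pvRotW
  rw [PySem.List.slice_from_natCast]
  rw [show ((4:Int)) = ((4:Nat):Int) by norm_num, PySem.List.slice_to_natCast]

-- the rotate-then-truncate window equals A's conditional wrap slices, for 0 ≤ i < len t
theorem win_eq (t : List Int) (i : Int) (h0 : 0 ≤ i) (h1 : i < (t.length : Int)) :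
    (if i > (t.length : Int) - 4 then
      PySem.List.slice t (some i) none ++ PySem.List.slice t none (some (4 - (t.length : Int) + i))
    else PySem.List.slice t (some i) (some (i + 4))) = pvRotW t i := by
  obtain ⟨k, rfl⟩ : ∃ k : Nat, i = (k : Int) := ⟨i.toNat, (Int.toNat_of_nonneg h0).symm⟩
  have hk : k < t.length := by exact_mod_cast h1
  rw [rotW_take, List.take_append, List.length_drop, PySem.List.slice_from_natCast]
  split_ifs with h
  · rw [List.take_of_length_le (by simp; omega),
        PySem.List.slice_to _ (by omega)]
    congr 2
    omega
  · rw [PySem.List.slice_toNat _ (by positivity) (by positivity)]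
    have h4 : ((k:Int) + 4).toNat - ((k:Int)).toNat = 4 := by omega
    have h0' : (4:Nat) - (t.length - k) = 0 := by omega
    rw [h4, h0']
    simp

-- a range over a product enumerates two nested ranges
theorem range_mul_flatMap {α : Type} (m n : Nat) (f : Nat → α) :
    (List.range (m * n)).map f
      = (List.range m).flatMap (fun i => (List.range n).map (fun j => f (i * n + j))) := by
  induction m with
  | zero => simp
  | succ m ih =>
    rw [Nat.succ_mul, List.range_add, List.map_append, List.range_succ, List.flatMap_append, ih]
    simp [Function.comp]

-- mixed-radix decoding of a composite index
theorem decode4 (n0 n1 n2 n3 i0 i1 i2 i3 : Nat) (h0 : i0 < n0) (h1 : i1 < n1)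
    (h2 : i2 < n2) (h3 : i3 < n3) :
    ((i0 * (n1 * (n2 * n3)) + (i1 * (n2 * n3) + (i2 * n3 + i3))) / n3 / n2 / n1 % n0 = i0 ∧
     (i0 * (n1 * (n2 * n3)) + (i1 * (n2 * n3) + (i2 * n3 + i3))) / n3 / n2 % n1 = i1 ∧
     (i0 * (n1 * (n2 * n3)) + (i1 * (n2 * n3) + (i2 * n3 + i3))) / n3 % n2 = i2 ∧
     (i0 * (n1 * (n2 * n3)) + (i1 * (n2 * n3) + (i2 * n3 + i3))) % n3 = i3) := by
  have e : i0 * (n1 * (n2 * n3)) + (i1 * (n2 * n3) + (i2 * n3 + i3))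
      = i3 + n3 * (i2 + n2 * (i1 + n1 * i0)) := by ring
  simp only [e]
  rw [Nat.add_mul_mod_self_left, Nat.mod_eq_of_lt h3,
      Nat.add_mul_div_left _ _ (by omega : 0 < n3), Nat.div_eq_of_lt h3, Nat.zero_add,
      Nat.add_mul_mod_self_left, Nat.mod_eq_of_lt h2,
      Nat.add_mul_div_left _ _ (by omega : 0 < n2), Nat.div_eq_of_lt h2, Nat.zero_add,
      Nat.add_mul_mod_self_left, Nat.mod_eq_of_lt h1,
      Nat.add_mul_div_left _ _ (by omega : 0 < n1), Nat.div_eq_of_lt h1, Nat.zero_add,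
      Nat.mod_eq_of_lt h0]
  exact ⟨rfl, rfl, rfl, rfl⟩

-- the flat range over the 4-fold product enumerates the nested ranges, via divmod decoding
theorem quad_range {α : Type} (n0 n1 n2 n3 : Nat) (f : Nat → Nat → Nat → Nat → α) :
    (List.range (n0 * n1 * n2 * n3)).map
        (fun k => f (k / n3 / n2 / n1 % n0) (k / n3 / n2 % n1) (k / n3 % n2) (k % n3))
      = (List.range n0).flatMap (fun i0 => (List.range n1).flatMap (fun i1 =>
          (List.range n2).flatMap (fun i2 => (List.range n3).map (fun i3 => f i0 i1 i2 i3)))) := by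
  have assoc : n0 * n1 * n2 * n3 = n0 * (n1 * (n2 * n3)) := by ring
  rw [assoc, range_mul_flatMap]
  refine List.flatMap_congr (fun i0 hi0 => ?_)
  rw [range_mul_flatMap]
  refine List.flatMap_congr (fun i1 hi1 => ?_)
  rw [range_mul_flatMap]
  refine List.flatMap_congr (fun i2 hi2 => ?_)
  refine List.map_congr_left (fun i3 hi3 => ?_)
  have h0 := List.mem_range.mp hi0
  have h1 := List.mem_range.mp hi1
  have h2 := List.mem_range.mp hi2
  have h3 := List.mem_range.mp hi3
  obtain ⟨e0, e1, e2, e3⟩ := decode4 n0 n1 n2 n3 i0 i1 i2 i3 h0 h1 h2 h3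
  rw [e0, e1, e2, e3]

-- A on four (or more) tracks is the normal form
theorem A_eq (t0 t1 t2 t3 : List Int) (r : List (List Int)) :
    generateMatrices (t0 :: t1 :: t2 :: t3 :: r) = pvNF t0 t1 t2 t3 := by
  have e0 : PySem.List.pyGetD (t0 :: t1 :: t2 :: t3 :: r) 0 ([] : List Int) = t0 := by
    rw [show ((0:Int)) = ((0:Nat):Int) by norm_num, PySem.List.pyGetD_natCast]; rfl
  have e1 : PySem.List.pyGetD (t0 :: t1 :: t2 :: t3 :: r) 1 ([] : List Int) = t1 := by
    rw [show ((1:Int)) = ((1:Nat):Int) by norm_num, PySem.List.pyGetD_natCast]; rfl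
  have e2 : PySem.List.pyGetD (t0 :: t1 :: t2 :: t3 :: r) 2 ([] : List Int) = t2 := by
    rw [show ((2:Int)) = ((2:Nat):Int) by norm_num, PySem.List.pyGetD_natCast]; rfl
  have e3 : PySem.List.pyGetD (t0 :: t1 :: t2 :: t3 :: r) 3 ([] : List Int) = t3 := by
    rw [show ((3:Int)) = ((3:Nat):Int) by norm_num, PySem.List.pyGetD_natCast]; rfl
  unfold generateMatrices
  simp only [e0, e1, e2, e3]
  simp only [PySem.List.foldl_append_eq_flatMap, List.nil_append]
  unfold pvNF
  refine List.flatMap_congr (fun i0 hi0 => ?_)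
  refine List.flatMap_congr (fun i1 hi1 => ?_)
  refine List.flatMap_congr (fun i2 hi2 => ?_)
  refine List.flatMap_congr (fun i3 hi3 => ?_)
  obtain ⟨l0, h0⟩ := (PySem.List.mem_pyRange_one).mp hi0
  obtain ⟨l1, h1⟩ := (PySem.List.mem_pyRange_one).mp hi1
  obtain ⟨l2, h2⟩ := (PySem.List.mem_pyRange_one).mp hi2
  obtain ⟨l3, h3⟩ := (PySem.List.mem_pyRange_one).mp hi3
  rw [win_eq t0 _ l0 h0, win_eq t1 _ l1 h1, win_eq t2 _ l2 h2, win_eq t3 _ l3 h3]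

-- B on four (or more) tracks is the normal form
theorem B_eq (t0 t1 t2 t3 : List Int) (r : List (List Int)) :
    generateMatrices_alt (t0 :: t1 :: t2 :: t3 :: r) = pvNF t0 t1 t2 t3 := by
  unfold generateMatrices_alt
  rw [PySem.List.slice_to _ (by norm_num)]
  have htake : (t0 :: t1 :: t2 :: t3 :: r).take (4:Int).toNat = [t0, t1, t2, t3] := rfl
  rw [htake]
  simp only [List.map_cons, List.map_nil, List.foldl_cons, List.foldl_nil, List.reverse_cons,
    List.reverse_nil, List.nil_append, List.cons_append, List.length_map,
    PySem.List.length_pyRange_one, sub_zero, Int.toNat_natCast]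
  rw [show (1 * (t0.length:Int) * t1.length * t2.length * t3.length) = ((t0.length*t1.length*t2.length*t3.length : Nat) : Int) by push_cast; ring]
  rw [PySem.List.foldl_append_singleton_eq_map, PySem.List.pyRange_zero_natCast (t0.length*t1.length*t2.length*t3.length),
    List.map_map, List.nil_append]
  have step1 : ∀ k ∈ List.range (t0.length*t1.length*t2.length*t3.length),
      ((fun idx =>
          [PySem.List.pyGetD (List.map (pvRotW t0) (PySem.List.pyRange 0 (t0.length:Int) 1))
              (PySem.Int.mod (PySem.Int.floordiv (PySem.Int.floordiv (PySem.Int.floordiv idx (t3.length:Int)) (t2.length:Int)) (t1.length:Int)) (t0.length:Int)) [],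
            PySem.List.pyGetD (List.map (pvRotW t1) (PySem.List.pyRange 0 (t1.length:Int) 1))
              (PySem.Int.mod (PySem.Int.floordiv (PySem.Int.floordiv idx (t3.length:Int)) (t2.length:Int)) (t1.length:Int)) [],
            PySem.List.pyGetD (List.map (pvRotW t2) (PySem.List.pyRange 0 (t2.length:Int) 1))
              (PySem.Int.mod (PySem.Int.floordiv idx (t3.length:Int)) (t2.length:Int)) [],
            PySem.List.pyGetD (List.map (pvRotW t3) (PySem.List.pyRange 0 (t3.length:Int) 1))
              (PySem.Int.mod idx (t3.length:Int)) []]) ∘ (fun (k:Nat) => (k:Int))) k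
        = (fun k => [pvRotW t0 ((k / t3.length / t2.length / t1.length % t0.length : Nat) : Int), pvRotW t1 ((k / t3.length / t2.length % t1.length : Nat) : Int),
            pvRotW t2 ((k / t3.length % t2.length : Nat) : Int), pvRotW t3 ((k % t3.length : Nat) : Int)]) k := by
    intro k hk
    have hkN : k < t0.length*t1.length*t2.length*t3.length := List.mem_range.mp hk
    have h0 : 0 < t0.length := Nat.pos_of_ne_zero (fun h => by rw [h] at hkN; simp at hkN)
    have h1 : 0 < t1.length := Nat.pos_of_ne_zero (fun h => by rw [h] at hkN; simp at hkN)
    have h2 : 0 < t2.length := Nat.pos_of_ne_zero (fun h => by rw [h] at hkN; simp at hkN)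
    have h3 : 0 < t3.length := Nat.pos_of_ne_zero (fun h => by rw [h] at hkN; simp at hkN)
    simp only [Function.comp_apply, PySem.Int.floordiv_natCast, PySem.Int.mod_natCast]
    rw [PySem.List.pyGetD_map_pyRange _ _ _ _ (Nat.mod_lt _ h0),
        PySem.List.pyGetD_map_pyRange _ _ _ _ (Nat.mod_lt _ h1),
        PySem.List.pyGetD_map_pyRange _ _ _ _ (Nat.mod_lt _ h2),
        PySem.List.pyGetD_map_pyRange _ _ _ _ (Nat.mod_lt _ h3)]
  rw [List.map_congr_left step1, quad_range t0.length t1.length t2.length t3.length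
    (fun i0 i1 i2 i3 => [pvRotW t0 (i0:Int), pvRotW t1 (i1:Int), pvRotW t2 (i2:Int), pvRotW t3 (i3:Int)])]
  unfold pvNF
  simp only [PySem.List.pyRange_zero_natCast, List.flatMap_map, ← List.map_eq_flatMap]

-- B's running product is the product of the window-table lengths
theorem foldl_mul_len (ws : List (List (List Int))) (c : Int) :
    ws.foldl (fun acc w => acc * (w.length : Int)) c = c * (ws.map (fun w => (w.length : Int))).prod := by
  induction ws generalizing c with
  | nil => simp
  | cons w ws ih => simp [ih, mul_assoc]

-- with fewer than four tracks, tracks[3] defaults to []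
theorem A_short (tracks : List (List Int)) (hlen : tracks.length < 4) :
    PySem.List.pyGetD tracks 3 ([] : List Int) = [] := by
  rw [show ((3:Int)) = ((3:Nat):Int) by norm_num, PySem.List.pyGetD_natCast]
  exact List.getD_eq_default _ _ (by omega)

-- with fewer than four tracks, A collapses to [] (the innermost range is empty)
theorem A_zero (tracks : List (List Int)) (hlen : tracks.length < 4) :
    generateMatrices tracks = [] := by
  simp only [generateMatrices, A_short tracks hlen]
  simp [PySem.List.pyRange_one_eq_nil]

-- with fewer than four tracks one of which is empty, B has total = 0 and returns []
theorem B_zero (tracks : List (List Int)) (hlen : tracks.length < 4)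
    (hemp : tracks.any List.isEmpty = true) :
    generateMatrices_alt tracks = [] := by
  simp only [generateMatrices_alt]
  rw [PySem.List.slice_to _ (by norm_num), List.take_of_length_le (by omega), foldl_mul_len]
  obtain ⟨t, ht, hte⟩ := List.any_eq_true.mp hemp
  have : ((fun t => (PySem.List.pyRange 0 (t.length : Int) 1).map (pvRotW t)) t).length = 0 := by
    simp [List.isEmpty_iff.mp hte]
  rw [List.prod_eq_zero (by
    refine List.mem_map.mpr ⟨_, List.mem_map.mpr ⟨t, ht, rfl⟩, ?_⟩
    simp [this])]
  simp [PySem.List.pyRange_zero_nat]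

-- ===== VERDICT (by name: the statement is the Claim_ definition above) =====
theorem generateMatrices_spec : Claim_equal_generateMatrices := by
  intro tracks _ hpre
  unfold Spec_generateMatrices
  by_cases h4 : 4 ≤ tracks.length
  · match tracks, h4 with
    | t0 :: t1 :: t2 :: t3 :: r, _ => rw [A_eq, B_eq]
  · rcases hpre with h | hemp
    · exact absurd h h4
    · exact (A_zero tracks (by omega)).trans (B_zero tracks (by omega) hemp).symm
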